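-- pv_equiv track=rewrite | github.com/bibiksh/Python_trainging | 2.Python_basic/Chapter04/Problem36.py | yearcal
-- ===== SOURCE A (Python) =====
-- def yearcal(n):   # string n
--     alist=[i for i in range(int(n)+1,10000)]
--     blist=[]
--     for i in range(1,10000):
--         blist.append(i)
--     for a in alist:
--         if len(set(str(a)))==4:
--             return a
-- ===== SOURCE B (Python) =====
-- def yearcal(n):   # string n
--     # Enumerate 4-digit numbers with pairwise-distinct digits directly, most
--     # significant digit first: candidates appear in increasing numeric order,
--     # so the first one exceeding int(n) is the answer.
--     v = int(n)
--     for d1 in range(1, 10):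
--         for d2 in range(10):
--             if d2 == d1:
--                 continue
--             for d3 in range(10):
--                 if d3 == d1 or d3 == d2:
--                     continue
--                 for d4 in range(10):
--                     if d4 == d1 or d4 == d2 or d4 == d3:
--                         continue
--                     a = 1000 * d1 + 100 * d2 + 10 * d3 + d4
--                     if a > v:
--                         return a
--     return None
-- ===== Notes on version B (the rewrite author's own statement) =====
-- stated objective: alternative
-- what changed: Instead of scanning int(n)+1..9999 and testing each value's decimal string with len(set(str(a)))==4, B constructs the 4-digit distinct-digit candidates digit by digit in increasing numeric order and returns the first one greater than int(n), touching at most 4536 candidates and building no strings or sets.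
-- intended difference: For inputs with int(n) <= -103 A returns the first NEGATIVE number m > int(n) whose decimal string has 4 distinct characters because it counts the minus sign as a digit (e.g. -102 for n = "-103"); B returns 1023, the smallest number with 4 distinct digits, which is the intended answer. — e.g. on yearcal("-103"): A returns some (-102), B returns some 1023
import Mathlib
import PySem

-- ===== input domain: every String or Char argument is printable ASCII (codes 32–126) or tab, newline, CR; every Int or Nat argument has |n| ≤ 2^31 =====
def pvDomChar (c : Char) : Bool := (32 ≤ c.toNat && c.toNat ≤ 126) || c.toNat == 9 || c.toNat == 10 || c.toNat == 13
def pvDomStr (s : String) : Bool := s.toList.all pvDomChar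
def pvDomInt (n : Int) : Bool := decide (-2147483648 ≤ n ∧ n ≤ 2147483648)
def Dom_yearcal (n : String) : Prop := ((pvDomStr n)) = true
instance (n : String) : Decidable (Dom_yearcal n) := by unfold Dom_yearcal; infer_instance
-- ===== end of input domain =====

-- B enumerates the 4-digit distinct-digit candidates digit by digit in increasing numeric order
-- and returns the first one > int(n), instead of scanning int(n)+1..9999 with len(set(str(a)))==4.

-- ===== PORT A =====
-- len(set(str(a))) == 4
def pvDistinct4 (a : Int) : Bool :=
  PySem.Set.len (PySem.Set.ofList (PySem.Int.toChars a)) == 4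

-- 'for a in alist: if …: return a' (falls off the end -> None)
def pvFirstA : List Int → Option Int
  | [] => none
  | a :: rest => if pvDistinct4 a then some a else pvFirstA rest

def yearcal (n : String) : Option Int :=
  match PySem.Int.ofStr? n with
  | none => none                                  -- int(n) raises ValueError: excluded by Pre_
  | some v =>
    let alist := PySem.List.pyRange (v + 1) 10000 1
    let _blist := (PySem.List.pyRange 1 10000 1).foldl (fun acc i => acc ++ [i]) ([] : List Int)  -- A's dead blist loop
    pvFirstA alist

-- ===== PORT B =====
def pvLoop4 (v d1 d2 d3 : Int) : List Int → Option Int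
  | [] => none
  | d4 :: rest =>
    if d4 == d1 || d4 == d2 || d4 == d3 then pvLoop4 v d1 d2 d3 rest
    else if 1000 * d1 + 100 * d2 + 10 * d3 + d4 > v then some (1000 * d1 + 100 * d2 + 10 * d3 + d4)
    else pvLoop4 v d1 d2 d3 rest

def pvLoop3 (v d1 d2 : Int) : List Int → Option Int
  | [] => none
  | d3 :: rest =>
    if d3 == d1 || d3 == d2 then pvLoop3 v d1 d2 rest
    else
      match pvLoop4 v d1 d2 d3 (PySem.List.pyRange 0 10 1) with
      | some a => some a
      | none => pvLoop3 v d1 d2 rest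

def pvLoop2 (v d1 : Int) : List Int → Option Int
  | [] => none
  | d2 :: rest =>
    if d2 == d1 then pvLoop2 v d1 rest
    else
      match pvLoop3 v d1 d2 (PySem.List.pyRange 0 10 1) with
      | some a => some a
      | none => pvLoop2 v d1 rest

def pvLoop1 (v : Int) : List Int → Option Int
  | [] => none
  | d1 :: rest =>
    match pvLoop2 v d1 (PySem.List.pyRange 0 10 1) with
    | some a => some a
    | none => pvLoop1 v rest

def yearcal_alt (n : String) : Option Int :=
  match PySem.Int.ofStr? n with
  | none => none
  | some v => pvLoop1 v (PySem.List.pyRange 1 10 1)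

-- ===== PRECONDITION & SPEC =====
-- Pre_ excludes exactly the strings int() rejects, where A raises ValueError.
def Pre_yearcal (n : String) : Prop := (PySem.Int.ofStr? n).isSome = true
instance (n : String) : Decidable (Pre_yearcal n) := by unfold Pre_yearcal; infer_instance
def pvWitness_yearcal : String := "7"

-- For inputs with int(n) <= -103, A returns the first NEGATIVE m > int(n) whose str(m) has 4
-- distinct characters (it counts the minus sign as a digit, e.g. -102 for n = "-103"); B returns
-- 1023, the smallest number with 4 distinct digits, which is the intended answer.
def D_yearcal (n : String) : Prop := (PySem.Int.ofStr? n).getD 0 ≤ -103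
instance (n : String) : Decidable (D_yearcal n) := by unfold D_yearcal; infer_instance

def Spec_yearcal (n : String) (out : Option Int) : Prop := ¬ D_yearcal n → out = yearcal_alt n
instance (n : String) (out : Option Int) : Decidable (Spec_yearcal n out) := by unfold Spec_yearcal; infer_instance

def pvDiffWitness_yearcal : String := "-103"
def pvDiffWitnessOut_yearcal : (Option Int) × (Option Int) := (some (-102), some 1023)

-- ===== CLAIM (what is proved, stated in full; the proofs are below) =====
def Claim_unchanged_yearcal : Prop := ∀ (n : String), Dom_yearcal n → Pre_yearcal n → Spec_yearcal n (yearcal n)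
def Claim_changed_yearcal : Prop := Dom_yearcal (pvDiffWitness_yearcal) ∧ Pre_yearcal (pvDiffWitness_yearcal) ∧ D_yearcal (pvDiffWitness_yearcal) ∧ yearcal (pvDiffWitness_yearcal) = pvDiffWitnessOut_yearcal.1 ∧ yearcal_alt (pvDiffWitness_yearcal) = pvDiffWitnessOut_yearcal.2 ∧ pvDiffWitnessOut_yearcal.1 ≠ pvDiffWitnessOut_yearcal.2
def Claim_exact_yearcal : Prop := ∀ (n : String), Dom_yearcal n → Pre_yearcal n → D_yearcal n → yearcal n ≠ yearcal_alt n

-- ===== LEMMAS AND PROOFS =====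

-- what each nested loop of B generates, as a list
def pvGen4 (d1 d2 d3 : Int) (l : List Int) : List Int :=
  (l.filter (fun d4 => !(d4 == d1 || d4 == d2 || d4 == d3))).map (fun d4 => 1000 * d1 + 100 * d2 + 10 * d3 + d4)
def pvGen3 (d1 d2 : Int) (l : List Int) : List Int :=
  (l.filter (fun d3 => !(d3 == d1 || d3 == d2))).flatMap (fun d3 => pvGen4 d1 d2 d3 (PySem.List.pyRange 0 10 1))
def pvGen2 (d1 : Int) (l : List Int) : List Int :=
  (l.filter (fun d2 => !(d2 == d1))).flatMap (fun d2 => pvGen3 d1 d2 (PySem.List.pyRange 0 10 1))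
def pvCand : List Int :=
  (PySem.List.pyRange 1 10 1).flatMap (fun d1 => pvGen2 d1 (PySem.List.pyRange 0 10 1))

theorem pvFirstA_eq (l : List Int) : pvFirstA l = l.find? pvDistinct4 := by
  induction l with
  | nil => rfl
  | cons a rest ih =>
    show (if pvDistinct4 a then some a else pvFirstA rest) = _
    by_cases h : pvDistinct4 a = true
    · rw [if_pos h, List.find?_cons_of_pos h]
    · rw [if_neg h, List.find?_cons_of_neg h, ih]

theorem pvLoop4_eq (v d1 d2 d3 : Int) (l : List Int) :
    pvLoop4 v d1 d2 d3 l = (pvGen4 d1 d2 d3 l).find? (fun a => decide (a > v)) := by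
  induction l with
  | nil => rfl
  | cons d4 rest ih =>
    show (if d4 == d1 || d4 == d2 || d4 == d3 then _ else _) = _
    by_cases h : (d4 == d1 || d4 == d2 || d4 == d3) = true
    · rw [if_pos h, ih]
      have hg : pvGen4 d1 d2 d3 (d4 :: rest) = pvGen4 d1 d2 d3 rest := by
        unfold pvGen4; rw [List.filter_cons, if_neg (by simp [h])]
      rw [hg]
    · rw [if_neg h]
      have hg : pvGen4 d1 d2 d3 (d4 :: rest) =
          (1000 * d1 + 100 * d2 + 10 * d3 + d4) :: pvGen4 d1 d2 d3 rest := by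
        unfold pvGen4; rw [List.filter_cons, if_pos (by simp [h]), List.map_cons]
      rw [hg]
      by_cases hgt : 1000 * d1 + 100 * d2 + 10 * d3 + d4 > v
      · rw [if_pos hgt, List.find?_cons_of_pos (by simpa using hgt)]
      · rw [if_neg hgt, List.find?_cons_of_neg (by simpa using hgt), ih]

theorem pvLoop3_eq (v d1 d2 : Int) (l : List Int) :
    pvLoop3 v d1 d2 l = (pvGen3 d1 d2 l).find? (fun a => decide (a > v)) := by
  induction l with
  | nil => rfl
  | cons d3 rest ih =>
    show (if d3 == d1 || d3 == d2 then _ else _) = _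
    by_cases h : (d3 == d1 || d3 == d2) = true
    · rw [if_pos h, ih]
      have hg : pvGen3 d1 d2 (d3 :: rest) = pvGen3 d1 d2 rest := by
        unfold pvGen3; rw [List.filter_cons, if_neg (by simp [h])]
      rw [hg]
    · rw [if_neg h]
      have hg : pvGen3 d1 d2 (d3 :: rest) =
          pvGen4 d1 d2 d3 (PySem.List.pyRange 0 10 1) ++ pvGen3 d1 d2 rest := by
        unfold pvGen3; rw [List.filter_cons, if_pos (by simp [h]), List.flatMap_cons]
      rw [hg, List.find?_append, ← pvLoop4_eq v d1 d2 d3]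
      cases hfa : pvLoop4 v d1 d2 d3 (PySem.List.pyRange 0 10 1) with
      | some a => simp
      | none => simp [ih]

theorem pvLoop2_eq (v d1 : Int) (l : List Int) :
    pvLoop2 v d1 l = (pvGen2 d1 l).find? (fun a => decide (a > v)) := by
  induction l with
  | nil => rfl
  | cons d2 rest ih =>
    show (if d2 == d1 then _ else _) = _
    by_cases h : (d2 == d1) = true
    · rw [if_pos h, ih]
      have hg : pvGen2 d1 (d2 :: rest) = pvGen2 d1 rest := by
        unfold pvGen2; rw [List.filter_cons, if_neg (by simp [h])]
      rw [hg]
    · rw [if_neg h]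
      have hg : pvGen2 d1 (d2 :: rest) =
          pvGen3 d1 d2 (PySem.List.pyRange 0 10 1) ++ pvGen2 d1 rest := by
        unfold pvGen2; rw [List.filter_cons, if_pos (by simp [h]), List.flatMap_cons]
      rw [hg, List.find?_append, ← pvLoop3_eq v d1 d2]
      cases hfa : pvLoop3 v d1 d2 (PySem.List.pyRange 0 10 1) with
      | some a => simp
      | none => simp [ih]

theorem pvLoop1_eq (v : Int) (l : List Int) :
    pvLoop1 v l = (l.flatMap (fun d1 => pvGen2 d1 (PySem.List.pyRange 0 10 1))).find? (fun a => decide (a > v)) := by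
  induction l with
  | nil => rfl
  | cons d1 rest ih =>
    show (match pvLoop2 v d1 (PySem.List.pyRange 0 10 1) with
      | some a => some a | none => pvLoop1 v rest) = _
    rw [List.flatMap_cons, List.find?_append, ← pvLoop2_eq v d1]
    cases hfa : pvLoop2 v d1 (PySem.List.pyRange 0 10 1) with
    | some a => simp
    | none => simp [ih]

-- B's candidates with leading digit d are exactly the values of [1000d, 1000d+1000) that pass
-- A's test; checked chunk by chunk by one kernel evaluation each
set_option maxRecDepth 100000 in
theorem pvChunk1 : pvGen2 1 (PySem.List.pyRange 0 10 1) = (PySem.List.pyRange 1000 2000 1).filter pvDistinct4 := by decide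
set_option maxRecDepth 100000 in
theorem pvChunk2 : pvGen2 2 (PySem.List.pyRange 0 10 1) = (PySem.List.pyRange 2000 3000 1).filter pvDistinct4 := by decide
set_option maxRecDepth 100000 in
theorem pvChunk3 : pvGen2 3 (PySem.List.pyRange 0 10 1) = (PySem.List.pyRange 3000 4000 1).filter pvDistinct4 := by decide
set_option maxRecDepth 100000 in
theorem pvChunk4 : pvGen2 4 (PySem.List.pyRange 0 10 1) = (PySem.List.pyRange 4000 5000 1).filter pvDistinct4 := by decide
set_option maxRecDepth 100000 in
theorem pvChunk5 : pvGen2 5 (PySem.List.pyRange 0 10 1) = (PySem.List.pyRange 5000 6000 1).filter pvDistinct4 := by decide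
set_option maxRecDepth 100000 in
theorem pvChunk6 : pvGen2 6 (PySem.List.pyRange 0 10 1) = (PySem.List.pyRange 6000 7000 1).filter pvDistinct4 := by decide
set_option maxRecDepth 100000 in
theorem pvChunk7 : pvGen2 7 (PySem.List.pyRange 0 10 1) = (PySem.List.pyRange 7000 8000 1).filter pvDistinct4 := by decide
set_option maxRecDepth 100000 in
theorem pvChunk8 : pvGen2 8 (PySem.List.pyRange 0 10 1) = (PySem.List.pyRange 8000 9000 1).filter pvDistinct4 := by decide
set_option maxRecDepth 100000 in
theorem pvChunk9 : pvGen2 9 (PySem.List.pyRange 0 10 1) = (PySem.List.pyRange 9000 10000 1).filter pvDistinct4 := by decide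
set_option maxRecDepth 100000 in
theorem pvLow : (PySem.List.pyRange 1 1000 1).filter pvDistinct4 = [] := by decide

-- B's candidates are exactly the values of 1..9999 that pass A's test
theorem pvCand_eq : pvCand = (PySem.List.pyRange 1 10000 1).filter pvDistinct4 := by
  unfold pvCand
  rw [show (PySem.List.pyRange 1 10 1) = [1, 2, 3, 4, 5, 6, 7, 8, 9] from by decide]
  simp only [List.flatMap_cons, List.flatMap_nil, List.append_nil]
  rw [pvChunk1, pvChunk2, pvChunk3, pvChunk4, pvChunk5, pvChunk6, pvChunk7, pvChunk8, pvChunk9]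
  rw [PySem.List.pyRange_one_append 1 1000 10000 (by norm_num) (by norm_num),
    List.filter_append, pvLow, List.nil_append,
    PySem.List.pyRange_one_append 1000 2000 10000 (by norm_num) (by norm_num), List.filter_append,
    PySem.List.pyRange_one_append 2000 3000 10000 (by norm_num) (by norm_num), List.filter_append,
    PySem.List.pyRange_one_append 3000 4000 10000 (by norm_num) (by norm_num), List.filter_append,
    PySem.List.pyRange_one_append 4000 5000 10000 (by norm_num) (by norm_num), List.filter_append,
    PySem.List.pyRange_one_append 5000 6000 10000 (by norm_num) (by norm_num), List.filter_append,
    PySem.List.pyRange_one_append 6000 7000 10000 (by norm_num) (by norm_num), List.filter_append,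
    PySem.List.pyRange_one_append 7000 8000 10000 (by norm_num) (by norm_num), List.filter_append,
    PySem.List.pyRange_one_append 8000 9000 10000 (by norm_num) (by norm_num), List.filter_append]

set_option maxRecDepth 100000 in
theorem pvNegNoMatch : (PySem.List.pyRange (-101) 1 1).all (fun m => !pvDistinct4 m) = true := by decide

-- find? q over (filter p l) where q holds on all of l is find? p l
theorem pvFind?_filter_of_all (p q : Int → Bool) (l : List Int) (h : ∀ a ∈ l, q a = true) :
    (l.filter p).find? q = l.find? p := by
  induction l with
  | nil => rfl
  | cons a rest ih =>
    by_cases hp : p a = true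
    · rw [List.filter_cons, if_pos hp, List.find?_cons_of_pos (h a (by simp)),
        List.find?_cons_of_pos hp]
    · rw [List.filter_cons, if_neg hp, List.find?_cons_of_neg hp]
      exact ih (fun a ha => h a (by simp [ha]))

theorem pvMain (v : Int) (hv : -103 < v) :
    (PySem.List.pyRange (v + 1) 10000 1).find? pvDistinct4 = pvCand.find? (fun a => decide (a > v)) := by
  rw [pvCand_eq]
  by_cases hbig : 9999 < v
  · rw [PySem.List.pyRange_one_eq_nil (by omega)]
    show (none : Option Int) = _
    symm
    rw [List.find?_eq_none]
    intro x hx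
    have hx' := (PySem.List.mem_pyRange_one.mp (List.mem_filter.mp hx).1)
    simp only [decide_eq_true_eq]
    omega
  · by_cases hle : v ≤ 0
    · -- v ∈ (-103, 0]: drop the matchless negative prefix on A's side,
      -- everything in 1..9999 is > v on B's side
      rw [PySem.List.pyRange_one_append (v + 1) 1 10000 (by omega) (by omega), List.find?_append]
      have h1 : (PySem.List.pyRange (v + 1) 1 1).find? pvDistinct4 = none := by
        rw [List.find?_eq_none]
        intro m hm
        have hm' := PySem.List.mem_pyRange_one.mp hm
        have := (List.all_eq_true.mp pvNegNoMatch) m (PySem.List.mem_pyRange_one.mpr (by omega))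
        simp_all
      rw [h1, pvFind?_filter_of_all]
      · rw [Option.none_or]
      · intro a ha
        have := PySem.List.mem_pyRange_one.mp ha
        simp only [decide_eq_true_eq]
        omega
    · -- v ∈ [1, 9999]: split 1..9999 at v+1 on B's side; the low part has nothing > v
      rw [PySem.List.pyRange_one_append 1 (v + 1) 10000 (by omega) (by omega), List.filter_append,
        List.find?_append]
      have h1 : ((PySem.List.pyRange 1 (v + 1) 1).filter pvDistinct4).find? (fun a => decide (a > v)) = none := by
        rw [List.find?_eq_none]
        intro x hx
        have := PySem.List.mem_pyRange_one.mp (List.mem_filter.mp hx).1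
        simp only [decide_eq_true_eq]
        omega
      rw [h1, pvFind?_filter_of_all]
      · simp
      · intro a ha
        have := PySem.List.mem_pyRange_one.mp ha
        simp only [decide_eq_true_eq]
        omega

-- on an ascending range, the first match is at most any given match
theorem pvFind?_pyRange_le (p : Int → Bool) (a b m : Int) (h1 : a ≤ m) (h2 : m < b) (hp : p m = true) :
    ∃ x, (PySem.List.pyRange a b 1).find? p = some x ∧ x ≤ m := by
  rw [PySem.List.pyRange_one_append a m b h1 (le_of_lt h2), List.find?_append]
  cases hfa : (PySem.List.pyRange a m 1).find? p with
  | some x =>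
    refine ⟨x, by simp, ?_⟩
    have := PySem.List.mem_pyRange_one.mp (List.mem_of_find?_eq_some hfa)
    omega
  | none =>
    rw [PySem.List.pyRange_one_cons h2]
    exact ⟨m, by simp [List.find?_cons_of_pos hp], le_refl m⟩

-- the smallest candidate is 1023
theorem pvCandHead : pvCand = 1023 :: ((PySem.List.pyRange 1024 10000 1).filter pvDistinct4) := by
  rw [pvCand_eq, PySem.List.pyRange_one_append 1 1024 10000 (by norm_num) (by norm_num),
    List.filter_append, PySem.List.pyRange_one_append 1 1000 1024 (by norm_num) (by norm_num),
    List.filter_append, pvLow, List.nil_append,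
    show (PySem.List.pyRange 1000 1024 1).filter pvDistinct4 = [1023] from by decide]
  rfl

-- ===== VERDICT (by name: the statement is the Claim_ definition above) =====
theorem yearcal_spec : Claim_unchanged_yearcal := by
  intro n _ hpre hD
  unfold Pre_yearcal at hpre
  cases h : PySem.Int.ofStr? n with
  | none => rw [h] at hpre; simp at hpre
  | some v =>
    unfold D_yearcal at hD
    rw [h] at hD
    simp only [Option.getD_some] at hD
    show yearcal n = yearcal_alt n
    unfold yearcal yearcal_alt
    rw [h]
    simp only
    rw [pvFirstA_eq, pvLoop1_eq]
    exact pvMain v (by omega)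

set_option maxRecDepth 1000000 in
set_option maxHeartbeats 1000000 in
theorem yearcal_changed : Claim_changed_yearcal := by
  unfold Claim_changed_yearcal
  exact ⟨by decide, by decide, by decide, by decide, by decide, by decide⟩

set_option maxRecDepth 100000 in
theorem yearcal_tight : Claim_exact_yearcal := by
  intro n _ hpre hD
  unfold Pre_yearcal at hpre
  cases h : PySem.Int.ofStr? n with
  | none => rw [h] at hpre; simp at hpre
  | some v =>
    unfold D_yearcal at hD
    rw [h] at hD
    simp only [Option.getD_some] at hD
    unfold yearcal yearcal_alt
    rw [h]
    simp only
    rw [pvFirstA_eq, pvLoop1_eq]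
    have hd102 : pvDistinct4 (-102) = true := by decide
    obtain ⟨x, hx, hxle⟩ :=
      pvFind?_pyRange_le pvDistinct4 (v + 1) 10000 (-102) (by omega) (by omega) hd102
    rw [hx]
    show _ ≠ pvCand.find? (fun a => decide (a > v))
    rw [pvCandHead, List.find?_cons_of_pos (by simp; omega)]
    simp only [ne_eq, Option.some.injEq]
    omega
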